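-- pv_equiv track=rewrite | github.com/oshura3/Athena-Public | examples/scripts/compress_sessions.py | parse_session_log
-- ===== SOURCE A (Python) =====
-- def parse_session_log(content: str) -> dict:
--     """Parse session log into sections."""
--     sections = {}
--     current_section = "header"
--     current_content = []
--
--     for line in content.split("\n"):
--         # Check if this is a section header
--         if line.startswith("## ") or line.startswith("### "):
--             if current_content:
--                 sections[current_section] = "\n".join(current_content)
--             current_section = line.strip()
--             current_content = [line]
--         else:
--             current_content.append(line)
--
--     # Don't forget the last section
--     if current_content:
--         sections[current_section] = "\n".join(current_content)
--
--     return sections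
-- ===== SOURCE B (Python) =====
-- def parse_session_log(content: str) -> dict:
--     """Parse session log into sections (segment decomposition via span scans)."""
--     lines = content.split("\n")
--     pre, rest = _span_non_header(lines)
--     sections = {}
--     if pre:
--         sections["header"] = "\n".join(pre)
--     while rest:
--         head, tail = rest[0], rest[1:]
--         seg, rest = _span_non_header(tail)
--         sections[head.strip()] = "\n".join([head] + seg)
--     return sections
--
-- def _is_header(line):
--     return line.startswith("## ") or line.startswith("### ")
--
-- def _span_non_header(lines):
--     for i, line in enumerate(lines):
--         if _is_header(line):
--             return lines[:i], lines[i:]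
--     return lines, []
-- ===== Notes on version B (the rewrite author's own statement) =====
-- stated objective: alternative
-- what changed: A threads a (sections, current_section, current_content) accumulator through one fold over the lines; B instead decomposes the line list into segments with span scans (longest non-header prefix, then one header-led segment per iteration) and inserts each finished segment directly.
import Mathlib
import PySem

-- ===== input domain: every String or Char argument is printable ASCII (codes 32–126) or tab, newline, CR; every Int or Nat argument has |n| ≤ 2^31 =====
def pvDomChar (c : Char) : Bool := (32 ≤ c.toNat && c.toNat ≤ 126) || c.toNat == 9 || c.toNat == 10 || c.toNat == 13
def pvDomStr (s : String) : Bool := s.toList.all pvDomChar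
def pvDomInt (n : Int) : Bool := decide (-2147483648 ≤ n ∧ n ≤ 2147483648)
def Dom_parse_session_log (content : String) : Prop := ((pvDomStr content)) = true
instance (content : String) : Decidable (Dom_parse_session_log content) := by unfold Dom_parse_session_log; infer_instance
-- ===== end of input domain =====

-- B replaces A's accumulator-threading fold by a two-level segment decomposition (span scans); objective: alternative.

-- shared header test: line.startswith("## ") or line.startswith("### ")
def psIsHeader (line : String) : Bool :=
  PySem.Str.startswith line "## " || PySem.Str.startswith line "### "

-- ===== PORT A =====
-- one fold step of A's for-loop over (sections, current_section, current_content)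
def stepA (st : PySem.Dict String String × String × List String) (line : String) :
    PySem.Dict String String × String × List String :=
  match st with
  | (sections, current_section, current_content) =>
    if psIsHeader line then
      ((if current_content ≠ [] then
          sections.insert current_section (PySem.Str.join "\n" current_content)
        else sections),
       PySem.Str.strip line, [line])
    else (sections, current_section, current_content ++ [line])

-- A's trailing "don't forget the last section" flush
def flushA (st : PySem.Dict String String × String × List String) : PySem.Dict String String :=
  match st with
  | (sections, current_section, current_content) =>
    if current_content ≠ [] then
      sections.insert current_section (PySem.Str.join "\n" current_content)
    else sections

def parse_session_log (content : String) : List (String × String) :=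
  let lines := (PySem.Str.split? content "\n").getD []
  (flushA (lines.foldl stepA (PySem.Dict.empty, "header", []))).items

-- ===== PORT B =====
-- _span_non_header: longest non-header prefix and the rest
def spanNonHeader : List String → List String × List String
  | [] => ([], [])
  | l :: tl =>
    if psIsHeader l then ([], l :: tl)
    else
      let p := spanNonHeader tl
      (l :: p.1, p.2)

theorem spanNonHeader_snd_length_le (L : List String) : (spanNonHeader L).2.length ≤ L.length := by
  induction L with
  | nil => simp [spanNonHeader]
  | cons l tl ih =>
    simp only [spanNonHeader]
    split
    · simp
    · simpa using Nat.le_succ_of_le ih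

-- B's while-loop: each iteration consumes one header line and its segment
def goB (sections : PySem.Dict String String) : List String → PySem.Dict String String
  | [] => sections
  | head :: tail =>
    goB (sections.insert (PySem.Str.strip head)
          (PySem.Str.join "\n" (head :: (spanNonHeader tail).1)))
        (spanNonHeader tail).2
termination_by rest => rest.length
decreasing_by
  exact Nat.lt_succ_of_le (spanNonHeader_snd_length_le tail)

def parse_session_log_alt (content : String) : List (String × String) :=
  let lines := (PySem.Str.split? content "\n").getD []
  let p := spanNonHeader lines
  let sections : PySem.Dict String String :=
    if p.1 ≠ [] then PySem.Dict.empty.insert "header" (PySem.Str.join "\n" p.1)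
    else PySem.Dict.empty
  (goB sections p.2).items

-- ===== PRECONDITION & SPEC =====
def Spec_parse_session_log (content : String) (out : List (String × String)) : Prop := out = parse_session_log_alt content
instance (content : String) (out : List (String × String)) : Decidable (Spec_parse_session_log content out) := by unfold Spec_parse_session_log; infer_instance

-- ===== CLAIM (what is proved, stated in full; the proofs are below) =====
def Claim_equal_parse_session_log : Prop := ∀ (content : String), Dom_parse_session_log content → Spec_parse_session_log content (parse_session_log content)

-- ===== LEMMAS AND PROOFS =====

-- A's loop as a direct recursion on the line list
def buildA (d : PySem.Dict String String) (cur : String) (curc : List String) :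
    List String → PySem.Dict String String
  | [] => if curc ≠ [] then d.insert cur (PySem.Str.join "\n" curc) else d
  | l :: tl =>
    if psIsHeader l then
      buildA (if curc ≠ [] then d.insert cur (PySem.Str.join "\n" curc) else d)
        (PySem.Str.strip l) [l] tl
    else buildA d cur (curc ++ [l]) tl

theorem foldA_eq_buildA (lines : List String) :
    ∀ d cur curc, flushA (lines.foldl stepA (d, cur, curc)) = buildA d cur curc lines := by
  induction lines with
  | nil => intro d cur curc; rfl
  | cons l tl ih =>
    intro d cur curc
    simp only [List.foldl_cons, stepA, buildA]
    by_cases h : psIsHeader l = true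
    · simp only [h, if_true]; exact ih _ _ _
    · simp only [Bool.not_eq_true] at h; simp only [h]; exact ih _ _ _

theorem spanNonHeader_append (L : List String) :
    (spanNonHeader L).1 ++ (spanNonHeader L).2 = L := by
  induction L with
  | nil => rfl
  | cons l tl ih =>
    simp only [spanNonHeader]
    split
    · rfl
    · simpa using ih

theorem spanNonHeader_fst_nonheader (L : List String) :
    ∀ x ∈ (spanNonHeader L).1, psIsHeader x = false := by
  induction L with
  | nil => simp [spanNonHeader]
  | cons l tl ih =>
    simp only [spanNonHeader]
    split
    · simp
    · rename_i h
      intro x hx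
      simp only [List.mem_cons] at hx
      rcases hx with rfl | hx
      · simpa using h
      · exact ih x hx

theorem spanNonHeader_snd_head (L : List String) :
    ∀ h tl, (spanNonHeader L).2 = h :: tl → psIsHeader h = true := by
  induction L with
  | nil => simp [spanNonHeader]
  | cons l tl ih =>
    simp only [spanNonHeader]
    split
    · rename_i hh
      intro h tl' he
      obtain ⟨rfl, rfl⟩ : l = h ∧ tl = tl' := by
        constructor <;> [exact (List.cons.injEq .. ▸ he).1; exact (List.cons.injEq .. ▸ he).2]
      exact hh
    · exact ih

-- skipping a non-header block just extends current_content
theorem buildA_append_nonheader (a : List String) (hna : ∀ x ∈ a, psIsHeader x = false) :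
    ∀ d cur curc b, buildA d cur curc (a ++ b) = buildA d cur (curc ++ a) b := by
  induction a with
  | nil => intro d cur curc b; simp
  | cons l tl ih =>
    intro d cur curc b
    have hl : psIsHeader l = false := hna l (by simp)
    simp only [List.cons_append, buildA, hl, Bool.false_eq_true, if_false]
    rw [ih (fun x hx => hna x (List.mem_cons_of_mem _ hx))]
    simp

-- from a header line on, buildA is B's while-loop
theorem buildA_eq_goB : ∀ (n : Nat) (tl : List String), tl.length ≤ n →
    ∀ (d : PySem.Dict String String) (h : String),
    buildA d (PySem.Str.strip h) [h] tl = goB d (h :: tl) := by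
  intro n
  induction n with
  | zero =>
    intro tl htl d h
    have : tl = [] := List.eq_nil_of_length_eq_zero (Nat.le_zero.mp htl)
    subst this
    simp [buildA, goB, spanNonHeader]
  | succ n ih =>
    intro tl htl d h
    have hsplit := spanNonHeader_append tl
    have hfst := spanNonHeader_fst_nonheader tl
    conv_lhs => rw [← hsplit]
    rw [buildA_append_nonheader _ hfst]
    rcases hr : (spanNonHeader tl).2 with _ | ⟨h', tl'⟩
    · simp only [buildA, goB, hr]
      simp
    · have hh' : psIsHeader h' = true := spanNonHeader_snd_head tl h' tl' hr
      simp only [buildA, hh', if_true, List.cons_append, List.nil_append, ne_eq, reduceCtorEq,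
        not_false_eq_true, if_true]
      have hlen : tl'.length ≤ n := by
        have h1 : (spanNonHeader tl).2.length ≤ tl.length := spanNonHeader_snd_length_le tl
        rw [hr] at h1
        simp only [List.length_cons] at h1
        omega
      rw [ih tl' hlen]
      simp only [goB, hr]

theorem dict_eq (content : String) :
    flushA (((PySem.Str.split? content "\n").getD []).foldl stepA (PySem.Dict.empty, "header", [])) =
      goB (if (spanNonHeader ((PySem.Str.split? content "\n").getD [])).1 ≠ [] then
             PySem.Dict.empty.insert "header"
               (PySem.Str.join "\n" (spanNonHeader ((PySem.Str.split? content "\n").getD [])).1)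
           else PySem.Dict.empty)
          (spanNonHeader ((PySem.Str.split? content "\n").getD [])).2 := by
  set lines := (PySem.Str.split? content "\n").getD [] with hl
  rw [foldA_eq_buildA]
  have hsplit := spanNonHeader_append lines
  have hfst := spanNonHeader_fst_nonheader lines
  conv_lhs => rw [← hsplit]
  rw [buildA_append_nonheader _ hfst]
  simp only [List.nil_append]
  rcases hr : (spanNonHeader lines).2 with _ | ⟨h, tl⟩
  · simp [buildA, goB]
  · have hh : psIsHeader h = true := spanNonHeader_snd_head lines h tl hr
    by_cases hp : (spanNonHeader lines).1 = []
    · simp only [hp, ne_eq, not_true_eq_false, if_false, buildA, hh, if_true]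
      rw [buildA_eq_goB tl.length tl (Nat.le_refl _)]
    · simp only [hp, ne_eq, not_false_eq_true, if_true, buildA, hh, if_true]
      rw [buildA_eq_goB tl.length tl (Nat.le_refl _)]

-- ===== VERDICT (by name: the statement is the Claim_ definition above) =====
theorem parse_session_log_spec : Claim_equal_parse_session_log := by
  intro content _
  unfold Spec_parse_session_log parse_session_log parse_session_log_alt
  simp only []
  rw [dict_eq content]
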